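-- pv_equiv track=rewrite | github.com/endomorphosis/municipal_scrape_workspace | data/state_domains/state_domains.py | infer_jurisdiction_name
-- ===== SOURCE A (Python) =====
-- from typing import Any, Dict, Iterable, List, Optional, Set, Tuple
--
-- def infer_jurisdiction_name(page_url: str, page_title: str) -> Optional[str]:
--     """Best-effort mapping of USA.gov per-state page -> state/territory name."""
--     hay = " ".join([page_url or "", page_title or ""]).lower()
--     # Prefer longest names first (e.g., "Northern Mariana Islands")
--     for name in sorted(STATE_ABBR.keys(), key=len, reverse=True):
--         if name.lower() in hay:
--             return name
--         # Common phrasing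
--         if ("state of " + name.lower()) in hay:
--             return name
--     return None
--
-- STATE_ABBR: Dict[str, str] = {
--     "Alabama":"AL","Alaska":"AK","Arizona":"AZ","Arkansas":"AR","California":"CA","Colorado":"CO","Connecticut":"CT",
--     "Delaware":"DE","Florida":"FL","Georgia":"GA","Hawaii":"HI","Idaho":"ID","Illinois":"IL","Indiana":"IN","Iowa":"IA",
--     "Kansas":"KS","Kentucky":"KY","Louisiana":"LA","Maine":"ME","Maryland":"MD","Massachusetts":"MA","Michigan":"MI",
--     "Minnesota":"MN","Mississippi":"MS","Missouri":"MO","Montana":"MT","Nebraska":"NE","Nevada":"NV","New Hampshire":"NH",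
--     "New Jersey":"NJ","New Mexico":"NM","New York":"NY","North Carolina":"NC","North Dakota":"ND","Ohio":"OH","Oklahoma":"OK",
--     "Oregon":"OR","Pennsylvania":"PA","Rhode Island":"RI","South Carolina":"SC","South Dakota":"SD","Tennessee":"TN",
--     "Texas":"TX","Utah":"UT","Vermont":"VT","Virginia":"VA","Washington":"WA","West Virginia":"WV","Wisconsin":"WI","Wyoming":"WY",
--     "District of Columbia":"DC",
--     "American Samoa":"AS","Guam":"GU","Northern Mariana Islands":"MP","Puerto Rico":"PR","United States Virgin Islands":"VI",
-- }
-- ===== SOURCE B (Python) =====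
-- from typing import List, Optional
--
-- # B only needs the jurisdiction names, in the same (insertion) order as STATE_ABBR.
-- STATE_NAMES: List[str] = [
--     "Alabama","Alaska","Arizona","Arkansas","California","Colorado","Connecticut",
--     "Delaware","Florida","Georgia","Hawaii","Idaho","Illinois","Indiana","Iowa",
--     "Kansas","Kentucky","Louisiana","Maine","Maryland","Massachusetts","Michigan",
--     "Minnesota","Mississippi","Missouri","Montana","Nebraska","Nevada","New Hampshire",
--     "New Jersey","New Mexico","New York","North Carolina","North Dakota","Ohio","Oklahoma",
--     "Oregon","Pennsylvania","Rhode Island","South Carolina","South Dakota","Tennessee",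
--     "Texas","Utah","Vermont","Virginia","Washington","West Virginia","Wisconsin","Wyoming",
--     "District of Columbia",
--     "American Samoa","Guam","Northern Mariana Islands","Puerto Rico","United States Virgin Islands",
-- ]
--
-- def infer_jurisdiction_name(page_url: str, page_title: str) -> Optional[str]:
--     """Best-effort mapping of USA.gov per-state page -> state/territory name."""
--     hay = (page_url + " " + page_title).lower()
--     best: Optional[str] = None
--     for name in STATE_NAMES:
--         if name.lower() in hay and (best is None or len(name) > len(best)):
--             best = name
--     return best
-- ===== Notes on version B (the rewrite author's own statement) =====
-- stated objective: alternative
-- what changed: B drops the length-sort with early-return scan (and A's dead 'state of ' re-check) and instead makes one forward pass over the names keeping the longest matching name seen so far with a strict comparison, so the first name of maximal length wins exactly like A's stable reverse-sort tie-break.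
import Mathlib
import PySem

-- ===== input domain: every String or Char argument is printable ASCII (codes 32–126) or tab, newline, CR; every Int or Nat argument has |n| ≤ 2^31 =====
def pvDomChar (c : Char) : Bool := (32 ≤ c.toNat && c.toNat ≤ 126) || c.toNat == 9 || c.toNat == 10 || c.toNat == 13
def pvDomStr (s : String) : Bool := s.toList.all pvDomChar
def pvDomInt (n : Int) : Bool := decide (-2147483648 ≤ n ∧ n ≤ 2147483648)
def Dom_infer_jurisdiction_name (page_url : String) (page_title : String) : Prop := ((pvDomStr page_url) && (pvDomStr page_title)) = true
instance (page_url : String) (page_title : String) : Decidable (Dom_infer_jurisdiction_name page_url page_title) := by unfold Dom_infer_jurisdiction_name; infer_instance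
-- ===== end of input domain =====

-- B replaces A's length-sort with early-return scan (and drops its dead "state of " re-check)
-- by a single forward pass over the names keeping the longest match seen so far (first wins on
-- ties) — a different decomposition, not claimed faster.

-- ===== PORT A =====
-- A's module constant: the STATE_ABBR dict
def STATE_ABBR : PySem.Dict String String := PySem.Dict.ofList [("Alabama","AL"), ("Alaska","AK"), ("Arizona","AZ"), ("Arkansas","AR"), ("California","CA"), ("Colorado","CO"), ("Connecticut","CT"), ("Delaware","DE"), ("Florida","FL"), ("Georgia","GA"), ("Hawaii","HI"), ("Idaho","ID"), ("Illinois","IL"), ("Indiana","IN"), ("Iowa","IA"), ("Kansas","KS"), ("Kentucky","KY"), ("Louisiana","LA"), ("Maine","ME"), ("Maryland","MD"), ("Massachusetts","MA"), ("Michigan","MI"), ("Minnesota","MN"), ("Mississippi","MS"), ("Missouri","MO"), ("Montana","MT"), ("Nebraska","NE"), ("Nevada","NV"), ("New Hampshire","NH"), ("New Jersey","NJ"), ("New Mexico","NM"), ("New York","NY"), ("North Carolina","NC"), ("North Dakota","ND"), ("Ohio","OH"), ("Oklahoma","OK"), ("Oregon","OR"), ("Pennsylvania","PA"), ("Rhode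 Island","RI"), ("South Carolina","SC"), ("South Dakota","SD"), ("Tennessee","TN"), ("Texas","TX"), ("Utah","UT"), ("Vermont","VT"), ("Virginia","VA"), ("Washington","WA"), ("West Virginia","WV"), ("Wisconsin","WI"), ("Wyoming","WY"), ("District of Columbia","DC"), ("American Samoa","AS"), ("Guam","GU"), ("Northern Mariana Islands","MP"), ("Puerto Rico","PR"), ("United States Virgin Islands","VI")]

-- A's for-loop over the length-sorted names, with its two early returns
def inferALoop (hay : String) : List String → Option String
  | [] => none
  | name :: rest =>
      if PySem.Str.isIn (PySem.Str.lower name) hay then some name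
      else if PySem.Str.isIn ("state of " ++ PySem.Str.lower name) hay then some name
      else inferALoop hay rest

def infer_jurisdiction_name (page_url : String) (page_title : String) : Option String :=
  let hay := PySem.Str.lower (PySem.Str.join " "
      [if page_url = "" then "" else page_url, if page_title = "" then "" else page_title])
  inferALoop hay (PySem.List.sorted STATE_ABBR.keys (fun n => PySem.Str.len n) true)

-- ===== PORT B =====
-- B's module constant: just the jurisdiction names, in STATE_ABBR's insertion order
def STATE_NAMES : List String := ["Alabama", "Alaska", "Arizona", "Arkansas", "California", "Colorado", "Connecticut", "Delaware", "Florida", "Georgia", "Hawaii", "Idaho", "Illinois", "Indiana", "Iowa", "Kansas", "Kentucky", "Louisiana", "Maine", "Maryland", "Massachusetts", "Michigan", "Minnesota", "Mississippi", "Missouri", "Montana", "Nebraska", "Nevada", "New Hampshire", "New Jersey", "New Mexico", "New York", "North Carolina", "North Dakota", "Ohio", "Oklahoma", "Oregon", "Pennsylvania", "Rhode Island", "South Carolina", "South Dakota", "Tennessee", "Texas", "Utah", "Vermont", "Virginia", "Washington", "West Virginia", "Wisconsin", "Wyoming", "District of Columbia", "American Samoa", "Guam", "Northern Mariana Islands",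 "Puerto Rico", "United States Virgin Islands"]

-- B's single pass: keep the longest matching name seen so far (strict >, so first longest wins)
def bestLoop (hay : String) (best : Option String) : List String → Option String
  | [] => best
  | name :: rest =>
      if PySem.Str.isIn (PySem.Str.lower name) hay
          && (match best with
              | none => true
              | some b => decide (PySem.Str.len b < PySem.Str.len name))
      then bestLoop hay (some name) rest
      else bestLoop hay best rest

def infer_jurisdiction_name_alt (page_url : String) (page_title : String) : Option String :=
  let hay := PySem.Str.lower (page_url ++ " " ++ page_title)
  bestLoop hay none STATE_NAMES

-- ===== PRECONDITION & SPEC =====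
def Spec_infer_jurisdiction_name (page_url : String) (page_title : String) (out : Option String) : Prop := out = infer_jurisdiction_name_alt page_url page_title
instance (page_url : String) (page_title : String) (out : Option String) : Decidable (Spec_infer_jurisdiction_name page_url page_title out) := by unfold Spec_infer_jurisdiction_name; infer_instance

-- ===== CLAIM (what is proved, stated in full; the proofs are below) =====
def Claim_equal_infer_jurisdiction_name : Prop := ∀ (page_url : String) (page_title : String), Dom_infer_jurisdiction_name page_url page_title → Spec_infer_jurisdiction_name page_url page_title (infer_jurisdiction_name page_url page_title)

-- ===== LEMMAS AND PROOFS =====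

-- the two haystack computations build the same string
lemma hay_eq (u t : String) :
    PySem.Str.join " " [if u = "" then "" else u, if t = "" then "" else t] = u ++ " " ++ t := by
  have hu : (if u = "" then "" else u) = u := by split <;> simp_all
  have ht : (if t = "" then "" else t) = t := by split <;> simp_all
  rw [hu, ht]
  have : (PySem.Str.join " " [u, t]).toList = (u ++ " " ++ t).toList := by
    rw [PySem.Str.toList_join]
    simp [PySem.Chars.join_cons_cons, PySem.Chars.join_singleton, String.toList_append]
  exact String.toList_inj.mp this

-- A's second test ("state of " + name) can only succeed when the first already did
lemma loopA_eq_find (hay : String) (L : List String) :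
    inferALoop hay L = L.find? (fun n => PySem.Str.isIn (PySem.Str.lower n) hay) := by
  induction L with
  | nil => rfl
  | cons n rest ih =>
    simp only [inferALoop, List.find?]
    cases h : PySem.Str.isIn (PySem.Str.lower n) hay with
    | true => simp
    | false =>
      have h2 : PySem.Str.isIn ("state of " ++ PySem.Str.lower n) hay = false := by
        cases hc : PySem.Str.isIn ("state of " ++ PySem.Str.lower n) hay with
        | false => rfl
        | true =>
          rw [PySem.Str.isIn_iff_infix, String.toList_append] at hc
          have hin : PySem.Str.isIn (PySem.Str.lower n) hay = true :=
            (PySem.Str.isIn_iff_infix _ _).mpr ((List.suffix_append _ _).isInfix.trans hc)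
          rw [h] at hin
          exact absurd hin (by simp)
      rw [h2]
      simpa using ih

-- proof-side helper: "longest so far, first wins" as a named accumulator step
def maxStep (key : String → Int) (acc : Option String) (x : String) : Option String :=
  match acc with
  | none => some x
  | some m => if key m < key x then some x else some m

lemma max?_eq_foldl_maxStep (key : String → Int) (M : List String) :
    PySem.List.max? M key = M.foldl (maxStep key) none := by
  unfold PySem.List.max?
  apply List.foldl_ext
  intro acc y _
  cases acc <;> rfl

lemma max?_append_singleton (key : String → Int) (M : List String) (x : String) :
    PySem.List.max? (M ++ [x]) key = maxStep key (PySem.List.max? M key) x := by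
  rw [max?_eq_foldl_maxStep, max?_eq_foldl_maxStep, List.foldl_append, List.foldl_cons,
    List.foldl_nil]

-- inserting x into a descending-by-key list, seen through find?
lemma find?_insertBy (p : String → Bool) (key : String → Int) (x : String) (S : List String)
    (hS : S.Pairwise (fun a b => key b ≤ key a)) :
    (PySem.List.insertBy (fun a b => decide (key b < key a)) x S).find? p
      = if p x = true then maxStep key (S.find? p) x else S.find? p := by
  induction S with
  | nil =>
    by_cases hp : p x = true
    · simp [PySem.List.insertBy, List.find?, hp, maxStep]
    · simp [PySem.List.insertBy, List.find?, hp]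
  | cons y T ih =>
    rcases List.pairwise_cons.mp hS with ⟨hy, hT⟩
    by_cases hxy : key y < key x
    · have hI : PySem.List.insertBy (fun a b => decide (key b < key a)) x (y :: T)
          = x :: y :: T := by simp [PySem.List.insertBy, hxy]
      rw [hI]
      by_cases hp : p x = true
      · rw [List.find?_cons_of_pos hp, if_pos hp]
        cases hm : (y :: T).find? p with
        | none => rfl
        | some m =>
          have hmem := List.mem_of_find?_eq_some hm
          have hle : key m ≤ key y := by
            rcases List.mem_cons.mp hmem with h | h
            · exact le_of_eq (congrArg key h)
            · exact hy m h
          have hlt : key m < key x := lt_of_le_of_lt hle hxy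
          simp [maxStep, hlt]
      · rw [List.find?_cons_of_neg hp, if_neg hp]
    · have hI : PySem.List.insertBy (fun a b => decide (key b < key a)) x (y :: T)
          = y :: PySem.List.insertBy (fun a b => decide (key b < key a)) x T := by
        simp [PySem.List.insertBy, hxy]
      rw [hI]
      by_cases hpy : p y = true
      · rw [List.find?_cons_of_pos hpy, List.find?_cons_of_pos hpy]
        by_cases hp : p x = true
        · rw [if_pos hp]
          simp [maxStep, hxy]
        · rw [if_neg hp]
      · rw [List.find?_cons_of_neg hpy, List.find?_cons_of_neg hpy, ih hT]

-- first match in the length-sorted list = first longest match in original order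
lemma sorted_find_eq_max (key : String → Int) (p : String → Bool) (K : List String) :
    (PySem.List.sorted K key true).find? p = PySem.List.max? (K.filter p) key := by
  induction K using List.reverseRecOn with
  | nil => rfl
  | append_singleton K x ih =>
    have hs : PySem.List.sorted (K ++ [x]) key true
        = PySem.List.insertBy (fun a b => decide (key b < key a)) x
            (PySem.List.sorted K key true) := by
      rw [PySem.List.sorted_rev_eq_foldl_insertBy, PySem.List.sorted_rev_eq_foldl_insertBy,
        List.foldl_append]
      rfl
    rw [hs, find?_insertBy p key x _ (PySem.List.sorted_pairwise_rev K key), ih,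
      List.filter_append]
    by_cases hp : p x = true
    · have hfx : List.filter p [x] = [x] := by simp [hp]
      rw [if_pos hp, hfx, max?_append_singleton]
    · have hfx : List.filter p [x] = [] := by
        simp only [List.filter]
        cases hpc : p x
        · rfl
        · exact absurd hpc hp
      rw [if_neg hp, hfx, List.append_nil]

-- B's single pass = fold of maxStep over the filtered list
lemma bestLoop_eq_foldl (hay : String) (L : List String) (best : Option String) :
    bestLoop hay best L
      = (L.filter (fun n => PySem.Str.isIn (PySem.Str.lower n) hay)).foldl
          (maxStep (fun n => PySem.Str.len n)) best := by
  induction L generalizing best with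
  | nil => rfl
  | cons name rest ih =>
    simp only [bestLoop, List.filter]
    cases hp : PySem.Str.isIn (PySem.Str.lower name) hay with
    | false => simpa using ih best
    | true =>
      cases best with
      | none => simpa [maxStep] using ih (some name)
      | some b =>
        by_cases hlt : b.length < name.length
        · simpa [maxStep, PySem.Str.len, Nat.cast_lt, hlt] using ih (some name)
        · simpa [maxStep, PySem.Str.len, Nat.cast_lt, hlt] using ih (some b)

-- the keys of STATE_ABBR are exactly B's STATE_NAMES
set_option maxRecDepth 4000 in
lemma keys_eq : STATE_ABBR.keys = STATE_NAMES := by rfl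

-- ===== VERDICT (by name: the statement is the Claim_ definition above) =====
theorem infer_jurisdiction_name_spec : Claim_equal_infer_jurisdiction_name := by
  intro page_url page_title _
  unfold Spec_infer_jurisdiction_name infer_jurisdiction_name infer_jurisdiction_name_alt
  simp only [hay_eq, loopA_eq_find, sorted_find_eq_max, bestLoop_eq_foldl, keys_eq,
    max?_eq_foldl_maxStep]
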